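-- pv_equiv track=rewrite | github.com/caseybarajas/Melodia | melodia/utils/music.py | minimize_movement
-- ===== SOURCE A (Python) =====
-- from typing import List, Dict, Optional, Union, Tuple, Set
--
-- def minimize_movement(
--     chord1: List[int],
--     chord2: List[int]
-- ) -> List[int]:
--     """Optimize voice leading between two chords"""
--     if not chord1 or not chord2:
--         return chord2
--
--     # Extend chords to same length
--     max_len = max(len(chord1), len(chord2))
--     c1 = chord1 + [n + 12 for n in chord1[:max_len - len(chord1)]]
--     c2 = chord2 + [n + 12 for n in chord2[:max_len - len(chord2)]]
--
--     # Find closest notes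
--     result = []
--     used = set()
--
--     for note1 in c1:
--         distances = [(abs(note1 - note2), note2) for note2 in c2
--                     if note2 not in used]
--         if distances:
--             _, closest = min(distances)
--             result.append(closest)
--             used.add(closest)
--
--     return sorted(result)
-- ===== SOURCE B (Python) =====
-- from bisect import bisect_left
--
-- def minimize_movement(chord1, chord2):
--     """Optimize voice leading between two chords (nearest-note greedy via a
--     sorted available-note list with binary search, instead of a full scan per note)."""
--     if not chord1 or not chord2:
--         return chord2
--
--     max_len = max(len(chord1), len(chord2))
--     c1 = chord1 + [n + 12 for n in chord1[:max_len - len(chord1)]]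
--     c2 = chord2 + [n + 12 for n in chord2[:max_len - len(chord2)]]
--
--     avail = sorted(set(c2))  # distinct candidate notes, ascending
--     result = []
--     for note1 in c1:
--         if avail:
--             i = bisect_left(avail, note1)
--             if i == 0:
--                 j = 0
--             elif i == len(avail):
--                 j = i - 1
--             elif note1 - avail[i - 1] <= avail[i] - note1:
--                 j = i - 1
--             else:
--                 j = i
--             result.append(avail.pop(j))
--     result.sort()
--     return result
-- ===== Notes on version B (the rewrite author's own statement) =====
-- stated objective: faster
-- what changed: Replaces A's per-note O(n) rebuild of a (distance, note) tuple list plus min() over it by a sorted list of the distinct candidate notes queried with bisect_left for the nearest neighbour (ties to the smaller note) and deletion of the chosen note.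
import Mathlib
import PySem

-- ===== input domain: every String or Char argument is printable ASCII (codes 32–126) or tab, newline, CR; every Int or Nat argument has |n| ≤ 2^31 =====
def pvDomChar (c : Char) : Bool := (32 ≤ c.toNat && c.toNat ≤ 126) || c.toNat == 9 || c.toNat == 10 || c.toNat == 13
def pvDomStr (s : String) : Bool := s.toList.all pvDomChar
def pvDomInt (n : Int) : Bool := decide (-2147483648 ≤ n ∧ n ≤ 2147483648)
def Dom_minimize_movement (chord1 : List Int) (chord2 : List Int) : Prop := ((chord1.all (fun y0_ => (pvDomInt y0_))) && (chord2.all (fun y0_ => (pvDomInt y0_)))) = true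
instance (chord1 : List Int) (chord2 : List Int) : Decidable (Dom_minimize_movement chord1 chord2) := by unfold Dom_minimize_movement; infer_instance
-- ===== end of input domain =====

-- B replaces A's per-note O(n) scan over the remaining candidate notes (a tuple list plus min)
-- by a binary search for the nearest neighbour in a sorted list of the distinct candidates.

-- ===== PORT A =====
def minimize_movement (chord1 : List Int) (chord2 : List Int) : List Int :=
  if chord1 = [] ∨ chord2 = [] then chord2 else
    let maxLen : Int := max (chord1.length : Int) (chord2.length : Int)
    let c1 := chord1 ++ (PySem.List.slice chord1 none (some (maxLen - (chord1.length : Int)))).map (fun n => n + 12)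
    let c2 := chord2 ++ (PySem.List.slice chord2 none (some (maxLen - (chord2.length : Int)))).map (fun n => n + 12)
    let st := c1.foldl (fun (st : List Int × PySem.Set Int) note1 =>
      let distances := (c2.filter (fun note2 => !(PySem.Set.contains st.2 note2))).map
          (fun note2 => (|note1 - note2|, note2))
      -- Python 'if distances: _, closest = min(distances)': min over tuples is lexicographic;
      -- min2? returns none exactly when distances is empty.
      match PySem.List.min2? distances (fun p => p.1) (fun p => p.2) with
      | some m => (st.1 ++ [m.2], PySem.Set.add st.2 m.2)
      | none => st) ([], PySem.Set.empty)
    PySem.List.sorted st.1 (fun x => x)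

-- ===== PORT B =====
-- index of the note of avail nearest to note1 (ties to the smaller note), as in Source B;
-- avail[i-1] / avail[i] are in range in their branches, so getD's default is never read.
def pvPickIdx (avail : List Int) (note1 : Int) : Nat :=
  let i := PySem.List.bisectLeft avail note1
  if i = 0 then 0
  else if i = avail.length then i - 1
  else if note1 - avail.getD (i - 1) 0 ≤ avail.getD i 0 - note1 then i - 1
  else i

def minimize_movement_alt (chord1 : List Int) (chord2 : List Int) : List Int :=
  if chord1 = [] ∨ chord2 = [] then chord2 else
    let maxLen : Int := max (chord1.length : Int) (chord2.length : Int)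
    let c1 := chord1 ++ (PySem.List.slice chord1 none (some (maxLen - (chord1.length : Int)))).map (fun n => n + 12)
    let c2 := chord2 ++ (PySem.List.slice chord2 none (some (maxLen - (chord2.length : Int)))).map (fun n => n + 12)
    let avail0 : List Int := PySem.List.sorted (PySem.Set.ofList c2) (fun x => x)
    let st := c1.foldl (fun (st : List Int × List Int) note1 =>
      if st.2 = [] then st
      else
        let j := pvPickIdx st.2 note1
        match PySem.List.pop? st.2 (j : Int) with
        | some (v, rest) => (st.1 ++ [v], rest)
        | none => st) ([], avail0)
    PySem.List.sorted st.1 (fun x => x)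

-- ===== PRECONDITION & SPEC =====
def Spec_minimize_movement (chord1 : List Int) (chord2 : List Int) (out : List Int) : Prop := out = minimize_movement_alt chord1 chord2
instance (chord1 : List Int) (chord2 : List Int) (out : List Int) : Decidable (Spec_minimize_movement chord1 chord2 out) := by unfold Spec_minimize_movement; infer_instance

-- ===== CLAIM (what is proved, stated in full; the proofs are below) =====
def Claim_equal_minimize_movement : Prop := ∀ (chord1 : List Int) (chord2 : List Int), Dom_minimize_movement chord1 chord2 → Spec_minimize_movement chord1 chord2 (minimize_movement chord1 chord2)

-- ===== LEMMAS AND PROOFS =====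

-- min2?'s fold step, under a name the proofs can rewrite with
def pvStep (acc : Option (Int × Int)) (x : Int × Int) : Option (Int × Int) :=
  match acc with
  | none => some x
  | some m =>
    if (decide (x.1 < m.1) || !decide (m.1 < x.1) && decide (x.2 < m.2)) = true then some x else some m

theorem pv_min2?_eq_foldl (xs : List (Int × Int)) :
    PySem.List.min2? xs (fun p => p.1) (fun p => p.2) = xs.foldl pvStep none := by
  unfold PySem.List.min2? pvStep
  congr 1
  funext acc x
  cases acc <;> simp

-- min over a list of Int pairs (lexicographic, as Python's min over tuples) is determined:
-- any member that is lexicographically ≤ every member is THE result (pairs with equal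
-- components are equal, so the minimum is unique).
theorem pv_min2?_aux (xs : List (Int × Int)) (r : Int × Int) :
    ∀ (m : Int × Int), (r = m ∨ r ∈ xs) → (∀ y ∈ m :: xs, r.1 < y.1 ∨ (r.1 = y.1 ∧ r.2 ≤ y.2)) →
    xs.foldl pvStep (some m) = some r := by
  induction xs with
  | nil =>
    intro m hmem _
    rcases hmem with h | h
    · simp [h]
    · simp at h
  | cons x xs ih =>
    intro m hmem hle
    have hrx := hle x (by simp)
    have hrm := hle m (by simp)
    simp only [List.foldl_cons]
    show xs.foldl pvStep (if (decide (x.1 < m.1) || !decide (m.1 < x.1) && decide (x.2 < m.2)) = true then some x else some m) = some r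
    by_cases hcond : (decide (x.1 < m.1) || !decide (m.1 < x.1) && decide (x.2 < m.2)) = true
    · simp only [hcond, if_pos]
      apply ih
      · rcases hmem with h | h
        · -- r = m, but x is lexicographically < m while r ≤ x: so r = x
          subst h
          simp only [Bool.or_eq_true, Bool.and_eq_true, Bool.not_eq_true', decide_eq_true_eq,
            decide_eq_false_iff_not] at hcond
          left
          rcases hrx with h1 | ⟨h1, h2⟩ <;> rcases hcond with h3 | ⟨h3, h4⟩ <;>
            exact Prod.ext (by omega) (by omega)
        · rcases List.mem_cons.mp h with h | h
          · exact Or.inl h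
          · exact Or.inr h
      · intro y hy
        rcases List.mem_cons.mp hy with h | h
        · exact h ▸ hrx
        · exact hle y (by simp [h])
    · simp only [hcond, if_neg, Bool.not_eq_true]
      apply ih
      · rcases hmem with h | h
        · exact Or.inl h
        · rcases List.mem_cons.mp h with h | h
          · -- r = x, and x is not lex-< m, while r ≤ m: then x = m
            subst h
            simp only [Bool.or_eq_true, Bool.and_eq_true, Bool.not_eq_true', decide_eq_true_eq,
              decide_eq_false_iff_not, not_or, not_and] at hcond
            left
            rcases hrm with h1 | ⟨h1, h2⟩ <;>
              exact Prod.ext (by omega) (by omega)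
          · exact Or.inr h
      · intro y hy
        rcases List.mem_cons.mp hy with h | h
        · exact h ▸ hrm
        · exact hle y (by simp [h])

theorem pv_min2?_eq_some (xs : List (Int × Int)) (r : Int × Int)
    (hr : r ∈ xs) (hmin : ∀ y ∈ xs, r.1 < y.1 ∨ (r.1 = y.1 ∧ r.2 ≤ y.2)) :
    PySem.List.min2? xs (fun p => p.1) (fun p => p.2) = some r := by
  cases xs with
  | nil => simp at hr
  | cons x xs =>
    rw [pv_min2?_eq_foldl, List.foldl_cons]
    show xs.foldl pvStep (some x) = some r
    have h1 : r = x ∨ r ∈ xs := by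
      rcases List.mem_cons.mp hr with h | h
      · exact Or.inl h
      · exact Or.inr h
    exact pv_min2?_aux xs r x h1 (fun y hy => hmin y hy)

-- pvPickIdx picks, from a nonempty strictly increasing avail, an in-range index whose
-- element is nearest to t (ties broken towards the smaller element).
theorem pv_pick_spec (avail : List Int) (t : Int)
    (hs : avail.Pairwise (· < ·)) (hne : avail ≠ []) :
    ∃ (hj : pvPickIdx avail t < avail.length),
    ∀ w ∈ avail, |t - avail[pvPickIdx avail t]| < |t - w| ∨
      (|t - avail[pvPickIdx avail t]| = |t - w| ∧ avail[pvPickIdx avail t] ≤ w) := by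
  have hlen : 0 < avail.length := List.length_pos_iff.mpr hne
  have hple : avail.Pairwise (· ≤ ·) := hs.imp (fun h => le_of_lt h)
  obtain ⟨hile, hlt, hge⟩ := PySem.List.bisectLeft_spec avail t hple
  have hmono : ∀ (a b : Nat) (hab : a < b) (hb : b < avail.length),
      avail[a]'(by omega) < avail[b] := fun a b hab hb =>
    List.pairwise_iff_getElem.mp hs a b (by omega) hb hab
  have habsge : ∀ x : Int, t ≤ x → |t - x| = x - t := fun x h => by
    rw [abs_sub_comm]; exact abs_of_nonneg (by omega)
  have habsle : ∀ x : Int, x ≤ t → |t - x| = t - x := fun x h =>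
    abs_of_nonneg (by omega)
  unfold pvPickIdx
  set i := PySem.List.bisectLeft avail t with hidef
  by_cases h0 : i = 0
  · -- every element is ≥ t; the first (smallest) one is picked
    rw [if_pos h0]
    refine ⟨hlen, ?_⟩
    intro w hw
    obtain ⟨k, hk, rfl⟩ := List.mem_iff_getElem.mp hw
    have h1 : t ≤ avail[0] := hge 0 hlen (by omega)
    have h2 : t ≤ avail[k] := hge k hk (by omega)
    have h3 : avail[0] ≤ avail[k] := by
      rcases Nat.eq_zero_or_pos k with hk0 | hk0
      · subst hk0; exact le_refl _
      · exact le_of_lt (hmono 0 k hk0 hk)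
    rw [habsge _ h1, habsge _ h2]
    omega
  · by_cases hL : i = avail.length
    · -- every element is < t; the last (largest) one is picked
      rw [if_neg h0, if_pos hL, hL]
      have hj : avail.length - 1 < avail.length := by omega
      refine ⟨by omega, ?_⟩
      intro w hw
      obtain ⟨k, hk, rfl⟩ := List.mem_iff_getElem.mp hw
      have h1 : avail[avail.length - 1] < t := by
        have := hlt (avail.length - 1) hj (by omega)
        simpa using this
      have h2 : avail[k] < t := hlt k hk (by omega)
      have h3 : avail[k] ≤ avail[avail.length - 1] := by
        rcases Nat.lt_or_ge k (avail.length - 1) with hk0 | hk0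
        · exact le_of_lt (hmono k _ hk0 hj)
        · have : k = avail.length - 1 := by omega
          subst this; exact le_refl _
      rw [habsle _ (le_of_lt h1), habsle _ (le_of_lt h2)]
      omega
    · -- avail[i-1] < t ≤ avail[i]: the nearer of the two neighbours is picked
      have hii : i < avail.length := by omega
      have hi1 : i - 1 < avail.length := by omega
      have hp : avail[i - 1] < t := hlt (i - 1) hi1 (by omega)
      have hsg : t ≤ avail[i] := hge i hii (by omega)
      have hgetp : avail.getD (i - 1) 0 = avail[i - 1] := List.getD_eq_getElem _ _ hi1
      have hgets : avail.getD i 0 = avail[i] := List.getD_eq_getElem _ _ hii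
      rw [if_neg h0, if_neg hL, hgetp, hgets]
      by_cases hcmp : t - avail[i - 1] ≤ avail[i] - t
      · rw [if_pos hcmp]
        refine ⟨hi1, ?_⟩
        intro w hw
        obtain ⟨k, hk, rfl⟩ := List.mem_iff_getElem.mp hw
        rw [habsle _ (le_of_lt hp)]
        rcases Nat.lt_or_ge k i with hki | hki
        · -- w is below t: it is at most avail[i-1]
          have h2 : avail[k] < t := hlt k hk (by omega)
          have h3 : avail[k] ≤ avail[i - 1] := by
            rcases Nat.lt_or_ge k (i - 1) with hk0 | hk0
            · exact le_of_lt (hmono k _ hk0 hi1)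
            · have : k = i - 1 := by omega
              subst this; exact le_refl _
          rw [habsle _ (le_of_lt h2)]
          omega
        · -- w is at least avail[i], which is ≥ t
          have h2 : t ≤ avail[k] := hge k hk (by omega)
          have h3 : avail[i] ≤ avail[k] := by
            rcases Nat.lt_or_ge i k with hk0 | hk0
            · exact le_of_lt (hmono i k hk0 hk)
            · have : k = i := by omega
              subst this; exact le_refl _
          rw [habsge _ h2]
          omega
      · rw [if_neg hcmp]
        refine ⟨hii, ?_⟩
        intro w hw
        obtain ⟨k, hk, rfl⟩ := List.mem_iff_getElem.mp hw
        rw [habsge _ hsg]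
        rcases Nat.lt_or_ge k i with hki | hki
        · have h2 : avail[k] < t := hlt k hk (by omega)
          have h3 : avail[k] ≤ avail[i - 1] := by
            rcases Nat.lt_or_ge k (i - 1) with hk0 | hk0
            · exact le_of_lt (hmono k _ hk0 hi1)
            · have : k = i - 1 := by omega
              subst this; exact le_refl _
          rw [habsle _ (le_of_lt h2)]
          omega
        · have h2 : t ≤ avail[k] := hge k hk (by omega)
          have h3 : avail[i] ≤ avail[k] := by
            rcases Nat.lt_or_ge i k with hk0 | hk0
            · exact le_of_lt (hmono i k hk0 hk)
            · have : k = i := by omega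
              subst this; exact le_refl _
          rw [habsge _ h2]
          omega

-- membership in eraseIdx of a strictly increasing list
theorem pv_mem_eraseIdx (avail : List Int) (j : Nat) (hj : j < avail.length)
    (hs : avail.Pairwise (· < ·)) (x : Int) :
    x ∈ avail.eraseIdx j ↔ x ∈ avail ∧ x ≠ avail[j] := by
  have hnd : avail.Nodup := hs.imp (fun h => ne_of_lt h)
  rw [Eq.symm (List.Nodup.erase_getElem hnd j hj), List.Nodup.mem_erase_iff hnd]
  tauto

-- proof-side names for the two loop bodies (definitionally equal to the ports' lambdas)
def pvStepA (c2 : List Int) (st : List Int × PySem.Set Int) (note1 : Int) : List Int × PySem.Set Int :=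
  match PySem.List.min2? ((c2.filter (fun note2 => !(PySem.Set.contains st.2 note2))).map
      (fun note2 => (|note1 - note2|, note2))) (fun p => p.1) (fun p => p.2) with
  | some m => (st.1 ++ [m.2], PySem.Set.add st.2 m.2)
  | none => st

def pvStepB (st : List Int × List Int) (note1 : Int) : List Int × List Int :=
  if st.2 = [] then st
  else match PySem.List.pop? st.2 ((pvPickIdx st.2 note1 : Nat) : Int) with
    | some (v, rest) => (st.1 ++ [v], rest)
    | none => st

theorem pv_contains_add_false (s : PySem.Set Int) (y x : Int) :
    PySem.Set.contains (PySem.Set.add s y) x = false ↔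
      (PySem.Set.contains s x = false ∧ x ≠ y) := by
  simp only [Bool.eq_false_iff, ne_eq, PySem.Set.contains_iff, PySem.Set.mem_add]
  tauto

-- the main loop invariant: both folds keep the same result list, while A's 'used' set and
-- B's 'avail' list describe complementary parts of the candidate set.
theorem pv_loop (c2 : List Int) (c1 : List Int) :
    ∀ (res : List Int) (used : PySem.Set Int) (avail : List Int),
    avail.Pairwise (· < ·) →
    (∀ x, x ∈ avail ↔ x ∈ c2 ∧ PySem.Set.contains used x = false) →
    (c1.foldl (pvStepA c2) (res, used)).1 = (c1.foldl pvStepB (res, avail)).1 := by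
  induction c1 with
  | nil => intro res used avail _ _; rfl
  | cons t c1 ih =>
    intro res used avail hpw hmem
    simp only [List.foldl_cons]
    by_cases ha : avail = []
    · -- no candidate left: both steps leave the state unchanged
      subst ha
      have hfilter : c2.filter (fun note2 => !(PySem.Set.contains used note2)) = [] := by
        rw [List.filter_eq_nil_iff]
        intro x hx hc
        have : x ∈ ([] : List Int) := (hmem x).mpr ⟨hx, by simpa using hc⟩
        simp at this
      have eA : pvStepA c2 (res, used) t = (res, used) := by
        unfold pvStepA
        rw [hfilter]
        rfl
      have eB : pvStepB (res, []) t = (res, []) := by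
        unfold pvStepB
        rfl
      rw [eA, eB]
      exact ih res used [] hpw hmem
    · -- some candidate left: both sides pick the same nearest note
      obtain ⟨hj, hmin⟩ := pv_pick_spec avail t hpw ha
      have hvmem : avail[pvPickIdx avail t] ∈ avail := List.getElem_mem hj
      obtain ⟨hvc2, hvused⟩ := (hmem _).mp hvmem
      have hminA : PySem.List.min2?
          ((c2.filter (fun note2 => !(PySem.Set.contains used note2))).map
            (fun note2 => (|t - note2|, note2))) (fun p => p.1) (fun p => p.2) =
          some (|t - avail[pvPickIdx avail t]|, avail[pvPickIdx avail t]) := by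
        apply pv_min2?_eq_some
        · exact List.mem_map.mpr ⟨_, List.mem_filter.mpr ⟨hvc2, by simp only [Bool.not_eq_true']; exact hvused⟩, rfl⟩
        · intro y hy
          obtain ⟨w, hwflt, rfl⟩ := List.mem_map.mp hy
          obtain ⟨hwc2, hwP⟩ := List.mem_filter.mp hwflt
          have hw : w ∈ avail := (hmem w).mpr ⟨hwc2, by simpa only [Bool.not_eq_true'] using hwP⟩
          simpa using hmin w hw
      have eA : pvStepA c2 (res, used) t =
          (res ++ [avail[pvPickIdx avail t]], PySem.Set.add used avail[pvPickIdx avail t]) := by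
        unfold pvStepA
        rw [hminA]
      have eB : pvStepB (res, avail) t =
          (res ++ [avail[pvPickIdx avail t]], avail.eraseIdx (pvPickIdx avail t)) := by
        unfold pvStepB
        rw [if_neg ha, PySem.List.pop?_natCast avail _ hj]
      rw [eA, eB]
      apply ih
      · exact hpw.sublist (List.eraseIdx_sublist avail (pvPickIdx avail t))
      · intro x
        rw [pv_mem_eraseIdx avail _ hj hpw x, hmem x, pv_contains_add_false]
        tauto

-- ===== VERDICT (by name: the statement is the Claim_ definition above) =====
theorem minimize_movement_spec : Claim_equal_minimize_movement := by
  intro chord1 chord2 _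
  unfold Spec_minimize_movement minimize_movement minimize_movement_alt
  by_cases hb : chord1 = [] ∨ chord2 = []
  · simp only [hb, if_pos]
  · simp only [if_neg hb]
    refine congrArg (fun l => PySem.List.sorted l (fun x => x)) (pv_loop _ _ _ _ _ ?_ ?_)
    · exact PySem.List.sorted_ofList_pairwise_lt _
    · intro x
      rw [PySem.List.mem_sorted, PySem.Set.mem_ofList]
      simp [PySem.Set.empty, PySem.Set.contains]
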